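-- pv_equiv track=rewrite | github.com/CDAPatel/whisper-hallu-detect | whisper/hallu_detect_utils.py | segment_detection
-- ===== SOURCE A (Python) =====
-- def segment_detection(data, seg_threshold):
--     # Finds all segments of consecutive 1s that are of length seq_threshold or larger
--     # Returns the start and end indexes of these segments
--     curr_length = 0
--     seg_start_idx = None
--
--     result = []
--
--     for i, val in enumerate(data):
--         # Check if the current element is 1
--         if val == 1:
--             # Start a new sequence if the current sequence length is 0
--             if curr_length == 0:
--                 seg_start_idx = i
--             # Increment the sequence length
--             curr_length += 1
--         else:
--             # Check length of segment against threshold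
--             if curr_length >= seg_threshold:
--                 result.append((seg_start_idx, i-1))
--             # Reset the current sequence length
--             curr_length = 0
--
--     # Check for a sequence at the end of the array
--     if curr_length >= seg_threshold:
--         result.append((seg_start_idx, len(data) - 1))
--
--     return result
-- ===== SOURCE B (Python) =====
-- def segment_detection(data, seg_threshold):
--     # Two-pointer run scanner: split data into maximal runs of equal values,
--     # emit (start, end) for runs of 1s whose length reaches the threshold.
--     result = []
--     n = len(data)
--     i = 0
--     while i < n:
--         j = i
--         while j < n and data[j] == data[i]:
--             j += 1
--         if data[i] == 1 and j - i >= seg_threshold: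
--             result.append((i, j - 1))
--         i = j
--     return result
-- ===== Notes on version B (the rewrite author's own statement) =====
-- stated objective: alternative
-- what changed: Replaces A's single-pass state machine (current-run-length counter, pending start index, boundary checks on value change and at the end) with a two-pointer scanner that splits the data into maximal runs of equal values and emits (start, end) for each qualifying run of 1s.
-- outside the precondition, e.g. on segment_detection([0], 0): A returns [(None, -1), (None, 0)], B returns []
import Mathlib
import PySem

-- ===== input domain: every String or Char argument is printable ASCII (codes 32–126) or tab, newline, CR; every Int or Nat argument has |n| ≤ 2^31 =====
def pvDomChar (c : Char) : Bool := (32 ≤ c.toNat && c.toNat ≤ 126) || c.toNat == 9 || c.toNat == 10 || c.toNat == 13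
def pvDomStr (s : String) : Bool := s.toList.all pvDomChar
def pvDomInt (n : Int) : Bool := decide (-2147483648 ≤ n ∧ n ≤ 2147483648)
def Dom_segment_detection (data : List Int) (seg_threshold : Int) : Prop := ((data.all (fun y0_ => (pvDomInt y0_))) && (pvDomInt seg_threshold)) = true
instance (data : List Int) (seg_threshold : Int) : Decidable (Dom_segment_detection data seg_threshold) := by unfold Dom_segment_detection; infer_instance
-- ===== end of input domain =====

-- B replaces A's run-length state machine by a two-pointer maximal-run scanner; same O(n) cost (objective: alternative).
-- Pre_ excludes non-positive thresholds, on which A's zero-length "runs" qualify and it returns pairs whose first component is None (not an int).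


-- ===== PORT A =====
-- Transliteration of A's for-loop as structural recursion over the remaining list,
-- carrying (i, curr_length, seg_start_idx, result).  seg_start_idx is Python's None → Option Int;
-- under Pre_ (threshold ≥ 1) every append happens with curr ≥ 1, hence seg_start_idx = some _,
-- so the `.getD 0` default is never consulted on admitted inputs.
def segGoA (seg_threshold : Int) : List Int → Int → Int → Option Int → List (Int × Int) → List (Int × Int)
  | [], i, curr, start, result =>
      -- trailing-segment check, with len(data) - 1 = i - 1 after the loop
      if seg_threshold ≤ curr then result ++ [(start.getD 0, i - 1)] else result
  | v :: rest, i, curr, start, result =>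
      if v = 1 then
        let start' := if curr = 0 then some i else start
        segGoA seg_threshold rest (i + 1) (curr + 1) start' result
      else
        let result' := if seg_threshold ≤ curr then result ++ [(start.getD 0, i - 1)] else result
        segGoA seg_threshold rest (i + 1) 0 start result'

def segment_detection (data : List Int) (seg_threshold : Int) : List (Int × Int) :=
  segGoA seg_threshold data 0 0 none []

-- ===== PORT B =====
-- Transliteration of B: the outer while-loop scans run by run; the inner while-loop
-- (j advancing over equal elements) is the takeWhile/dropWhile split of the rest.
def segGoB (seg_threshold : Int) : List Int → Int → List (Int × Int)
  | [], _ => []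
  | x :: xs, i =>
      let run := xs.takeWhile (· = x)
      let rest := xs.dropWhile (· = x)
      let len : Int := 1 + run.length
      (if x = 1 ∧ seg_threshold ≤ len then [(i, i + len - 1)] else []) ++
        segGoB seg_threshold rest (i + len)
  termination_by l _ => l.length
  decreasing_by
    simp only [List.length_cons]
    exact Nat.lt_succ_of_le (List.length_dropWhile_le _ _)

def segment_detection_alt (data : List Int) (seg_threshold : Int) : List (Int × Int) :=
  segGoB seg_threshold data 0

-- ===== PRECONDITION & SPEC =====
-- Pre_ excludes seg_threshold ≤ 0: there A's boundary check fires with curr_length = 0 and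
-- appends (None, i-1) — not a pair of ints — whenever a non-1 element or the end of the data
-- is reached outside a run of 1s.
def Pre_segment_detection (data : List Int) (seg_threshold : Int) : Prop := 1 ≤ seg_threshold
instance (data : List Int) (seg_threshold : Int) : Decidable (Pre_segment_detection data seg_threshold) := by unfold Pre_segment_detection; infer_instance
def pvWitness_segment_detection : List Int × Int := ([1, 1, 0, 1, 1, 1], 2)

def Spec_segment_detection (data : List Int) (seg_threshold : Int) (out : List (Int × Int)) : Prop := out = segment_detection_alt data seg_threshold
instance (data : List Int) (seg_threshold : Int) (out : List (Int × Int)) : Decidable (Spec_segment_detection data seg_threshold out) := by unfold Spec_segment_detection; infer_instance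

-- ===== CLAIM (what is proved, stated in full; the proofs are below) =====
def Claim_equal_segment_detection : Prop := ∀ (data : List Int) (seg_threshold : Int), Dom_segment_detection data seg_threshold → Pre_segment_detection data seg_threshold → Spec_segment_detection data seg_threshold (segment_detection data seg_threshold)

-- ===== LEMMAS AND PROOFS =====

-- Consuming a block of 1s: A increments curr and keeps the (already set) start index.
theorem segGoA_ones (t : Int) (run : List Int) (h : ∀ y ∈ run, y = 1) :
    ∀ (rest : List Int) (j c : Int), 1 ≤ c → ∀ (s : Int) (res : List (Int × Int)),
    segGoA t (run ++ rest) j c (some s) res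
      = segGoA t rest (j + run.length) (c + run.length) (some s) res := by
  induction run with
  | nil => intro rest j c _ s res; simp only [List.nil_append, List.length_nil, Int.natCast_zero, add_zero]
  | cons y run' ih =>
      intro rest j c hc s res
      have hy : y = 1 := h y (List.mem_cons_self)
      subst hy
      have hc0 : ¬ c = 0 := by omega
      simp only [List.cons_append, segGoA, hc0, if_true, if_false]
      rw [ih (fun z hz => h z (List.mem_cons_of_mem _ hz)) rest (j + 1) (c + 1) (by omega) s res]
      have h1 : j + 1 + (run'.length : Int) = j + (((1:Int) :: run').length : Int) := by
        push_cast [List.length_cons]; omega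
      have h2 : c + 1 + (run'.length : Int) = c + (((1:Int) :: run').length : Int) := by
        push_cast [List.length_cons]; omega
      rw [h1, h2]

-- Consuming a block of non-1s while curr = 0: A just advances i (no append when t ≥ 1).
theorem segGoA_zeros (t : Int) (ht : 1 ≤ t) (x : Int) (hx : x ≠ 1) (run : List Int)
    (h : ∀ y ∈ run, y = x) :
    ∀ (rest : List Int) (j : Int) (s : Option Int) (res : List (Int × Int)),
    segGoA t (run ++ rest) j 0 s res = segGoA t rest (j + run.length) 0 s res := by
  induction run with
  | nil => intro rest j s res; simp only [List.nil_append, List.length_nil, Int.natCast_zero, add_zero]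
  | cons y run' ih =>
      intro rest j s res
      have hy : y = x := h y (List.mem_cons_self)
      have hy1 : ¬ y = 1 := by rw [hy]; exact hx
      have ht0 : ¬ t ≤ (0 : Int) := by omega
      simp only [List.cons_append, segGoA, if_neg hy1, if_neg ht0]
      rw [ih (fun z hz => h z (List.mem_cons_of_mem _ hz)) rest (j + 1) s res]
      have h1 : j + 1 + (run'.length : Int) = j + ((y :: run').length : Int) := by
        push_cast [List.length_cons]; omega
      rw [h1]

-- Main invariant: at a run boundary (curr = 0), A's loop computes res ++ B's remaining output.
theorem segGo_main (t : Int) (ht : 1 ≤ t) :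
    ∀ (n : ℕ) (l : List Int), l.length ≤ n → ∀ (i : Int) (s : Option Int) (res : List (Int × Int)),
    segGoA t l i 0 s res = res ++ segGoB t l i := by
  intro n
  induction n with
  | zero =>
      intro l hl i s res
      have : l = [] := List.eq_nil_of_length_eq_zero (Nat.le_zero.mp hl)
      subst this
      simp [segGoA, segGoB, show ¬ t ≤ (0:Int) by omega]
  | succ n ih =>
      intro l hl i s res
      match l with
      | [] => simp [segGoA, segGoB, show ¬ t ≤ (0:Int) by omega]
      | x :: xs =>
        have hsplit : xs.takeWhile (· = x) ++ xs.dropWhile (· = x) = xs :=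
          List.takeWhile_append_dropWhile
        set run := xs.takeWhile (· = x) with hrun
        set rest := xs.dropWhile (· = x) with hrest
        have hrunall : ∀ y ∈ run, y = x := by
          intro y hy
          have := List.mem_takeWhile_imp hy
          simpa using this
        have hrestlen : rest.length ≤ n := by
          have h1 : rest.length ≤ xs.length := List.length_dropWhile_le _ _
          have h2 : xs.length + 1 ≤ n + 1 := by simpa using hl
          omega
        have hBstep : segGoB t (x :: xs) i
            = (if x = 1 ∧ t ≤ 1 + (run.length : Int) then [(i, i + (1 + (run.length : Int)) - 1)] else [])
              ++ segGoB t rest (i + (1 + (run.length : Int))) := by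
          rw [segGoB]
        by_cases hx : x = 1
        · -- a run of 1s
          have hones : ∀ y ∈ run, y = 1 := by intro y hy; rw [hrunall y hy, hx]
          have hA1 : segGoA t (x :: xs) i 0 s res
              = segGoA t rest (i + 1 + run.length) (1 + run.length) (some i) res := by
            simp only [segGoA, if_pos hx]
            norm_num
            rw [← hsplit, segGoA_ones t run hones rest (i + 1) 1 (by omega) i res]
          rw [hA1, hBstep]
          match hr : rest with
          | [] =>
              simp only [segGoA, segGoB, List.append_nil, hx, true_and]
              by_cases hc : t ≤ 1 + (run.length : Int)
              · simp only [if_pos hc, Option.getD_some]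
                have he : i + 1 + (run.length : Int) - 1 = i + (1 + (run.length : Int)) - 1 := by omega
                rw [he]
              · simp [hc]
          | y :: rest' =>
              have hy : ¬ (y = x) := by
                have h0 := List.head?_dropWhile_not (· = x) xs
                rw [← hrest] at h0
                simpa using h0
              have hy1 : ¬ y = 1 := by rw [← hx]; exact hy
              have ht0 : ¬ t ≤ (0 : Int) := by omega
              set res' := (if t ≤ 1 + (run.length : Int) then res ++ [(i, i + 1 + run.length - 1)] else res) with hres'
              have hA2 : segGoA t (y :: rest') (i + 1 + run.length) (1 + run.length) (some i) res
                  = segGoA t (y :: rest') (i + 1 + run.length) 0 (some i) res' := by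
                simp only [segGoA, if_neg hy1, if_neg ht0, Option.getD_some, hres']
              rw [hA2, ih (y :: rest') (by simpa [hr] using hrestlen) _ _ _]
              simp only [hx, true_and]
              have he1 : i + (1 + (run.length : Int)) = i + 1 + run.length := by omega
              rw [he1, hres']
              split_ifs with hc <;> simp
        · -- a run of non-1s
          have hA1 : segGoA t (x :: xs) i 0 s res = segGoA t rest (i + 1 + run.length) 0 s res := by
            simp only [segGoA, if_neg hx, if_neg (show ¬ t ≤ (0:Int) by omega)]
            rw [← hsplit, segGoA_zeros t ht x hx run hrunall rest (i + 1) s res]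
          rw [hA1, ih rest hrestlen _ _ _, hBstep]
          simp only [hx, false_and, if_false, List.nil_append]
          have he : i + (1 + (run.length : Int)) = i + 1 + run.length := by omega
          rw [he]

-- ===== VERDICT (by name: the statement is the Claim_ definition above) =====
theorem segment_detection_spec : Claim_equal_segment_detection := by
  intro data t _ hpre
  unfold Spec_segment_detection segment_detection segment_detection_alt
  simpa using segGo_main t hpre data.length data le_rfl 0 none []
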